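-- pv_equiv track=rewrite | github.com/xianNeuro/helper_functions | xianfunc.py | group_by_list_renum
-- ===== SOURCE A (Python) =====
-- def group_by_list_renum(group_by_list):
--     group_by = []
--     count=1
--     for i in range(0,len(group_by_list)):
--         if i !=0:
--             prev= group_by_list[i-1]
--             cur = group_by_list[i]
--             if prev!=cur:
--                 count+=1
--         group_by.append(count)
--     return group_by
-- ===== SOURCE B (Python) =====
-- def group_by_list_renum(group_by_list):
--     # run-grouping pass: split into maximal runs of equal consecutive values,
--     # number the runs from 1, emit each run index repeated by the run length
--     out = []
--     n = len(group_by_list)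
--     idx = 0
--     i = 0
--     while i < n:
--         v = group_by_list[i]
--         j = i + 1
--         while j < n and group_by_list[j] == v:
--             j += 1
--         idx += 1
--         out.extend([idx] * (j - i))
--         i = j
--     return out
-- ===== Notes on version B (the rewrite author's own statement) =====
-- stated objective: alternative
-- what changed: Replaces A's index loop with adjacent-pair comparison and a running counter by a two-level run-grouping pass: an inner scan finds the end of each maximal run of equal consecutive values, and each run is emitted as its 1-based run index repeated by the run length.
import Mathlib
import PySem

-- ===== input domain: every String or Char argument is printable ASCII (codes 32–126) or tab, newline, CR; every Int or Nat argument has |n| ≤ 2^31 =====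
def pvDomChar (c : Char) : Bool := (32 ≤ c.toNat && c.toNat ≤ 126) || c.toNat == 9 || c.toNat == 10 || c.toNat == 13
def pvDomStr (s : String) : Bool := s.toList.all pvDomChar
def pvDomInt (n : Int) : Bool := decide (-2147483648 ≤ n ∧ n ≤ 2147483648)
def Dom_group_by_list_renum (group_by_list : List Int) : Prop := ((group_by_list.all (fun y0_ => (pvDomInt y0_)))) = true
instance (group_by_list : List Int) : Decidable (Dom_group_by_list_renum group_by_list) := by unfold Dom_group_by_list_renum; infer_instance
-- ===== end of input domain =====

-- B replaces A's index loop with adjacent-pair comparison by a run-grouping pass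
-- (maximal runs of equal consecutive values, each emitted as its 1-based run index
-- repeated by the run length); objective: alternative decomposition, same cost.

-- ===== PORT A =====
-- for i in range(0, len(l)): if i != 0 compare l[i-1] with l[i]; append count.
-- indices i and i-1 are always in range, so pyGetD with a default is exact here.
def group_by_list_renum (group_by_list : List Int) : List Int :=
  (PySem.List.pyRange 0 (group_by_list.length : Int) 1).foldl
    (fun (st : List Int × Int) i =>
      let count :=
        if i ≠ 0 then
          let prev := PySem.List.pyGetD group_by_list (i - 1) 0
          let cur := PySem.List.pyGetD group_by_list i 0
          if prev ≠ cur then st.2 + 1 else st.2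
        else st.2
      (st.1 ++ [count], count))
    ([], 1) |>.1

-- ===== PORT B =====
-- inner while loop of B: first index j >= start with group_by_list[j] != v (or n)
def pvScan (l : List Int) (v : Int) (j : Nat) : Nat :=
  if h : j < l.length then
    if l[j] = v then pvScan l v (j + 1) else j
  else j
termination_by l.length - j

-- the port's outer loop needs this to terminate
theorem pvScan_ge (l : List Int) (v : Int) (j : Nat) : j ≤ pvScan l v j := by
  rw [pvScan]
  split
  · split
    · exact le_trans (Nat.le_succ j) (pvScan_ge l v (j + 1))
    · exact le_refl j
  · exact le_refl j
termination_by l.length - j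

-- outer while loop of B: emit run index (idx+1) for the run [i, j), advance i to j
def pvRun (l : List Int) (idx : Int) (i : Nat) : List Int :=
  if h : i < l.length then
    let v := l[i]
    let j := pvScan l v (i + 1)
    List.replicate (j - i) (idx + 1) ++ pvRun l (idx + 1) j
  else []
termination_by l.length - i
decreasing_by have := pvScan_ge l l[i] (i + 1); omega

def group_by_list_renum_alt (group_by_list : List Int) : List Int :=
  pvRun group_by_list 0 0

-- ===== PRECONDITION & SPEC =====
def Spec_group_by_list_renum (group_by_list : List Int) (out : List Int) : Prop := out = group_by_list_renum_alt group_by_list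
instance (group_by_list : List Int) (out : List Int) : Decidable (Spec_group_by_list_renum group_by_list out) := by unfold Spec_group_by_list_renum; infer_instance

-- ===== CLAIM (what is proved, stated in full; the proofs are below) =====
def Claim_equal_group_by_list_renum : Prop := ∀ (group_by_list : List Int), Dom_group_by_list_renum group_by_list → Spec_group_by_list_renum group_by_list (group_by_list_renum group_by_list)

-- ===== LEMMAS AND PROOFS =====

-- canonical left-to-right recursion both ports are reduced to:
-- state = (current count, previous element)
def pvCanon (c prev : Int) : List Int → List Int
  | [] => []
  | x :: xs => let c' := if prev ≠ x then c + 1 else c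
               c' :: pvCanon c' x xs

-- suffix view of B's run grouping (proof-only intermediate form)
def pvRunLen (v : Int) : List Int → Nat
  | [] => 0
  | x :: xs => if x = v then pvRunLen v xs + 1 else 0

def pvAltGo (idx : Int) : List Int → List Int
  | [] => []
  | v :: rest =>
      List.replicate (1 + pvRunLen v rest) (idx + 1) ++
        pvAltGo (idx + 1) (rest.drop (pvRunLen v rest))
termination_by l => l.length
decreasing_by simp

-- unfolding equations for the well-founded pvAltGo
theorem pvAltGo_nil (idx : Int) : pvAltGo idx [] = [] := by
  unfold pvAltGo
  rfl

theorem pvAltGo_cons (idx : Int) (v : Int) (rest : List Int) :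
    pvAltGo idx (v :: rest) =
      List.replicate (1 + pvRunLen v rest) (idx + 1) ++
        pvAltGo (idx + 1) (rest.drop (pvRunLen v rest)) := by
  conv_lhs => unfold pvAltGo

theorem pvScan_eq (l : List Int) (v : Int) (j : Nat) :
    pvScan l v j = j + pvRunLen v (l.drop j) := by
  rw [pvScan]
  split
  · rename_i h
    rw [List.drop_eq_getElem_cons h]
    split
    · rename_i hv
      rw [pvScan_eq l v (j + 1)]
      simp [pvRunLen, hv]
      omega
    · rename_i hv
      simp [pvRunLen, hv]
  · rename_i h
    rw [List.drop_eq_nil_iff.mpr (by omega)]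
    simp [pvRunLen]
termination_by l.length - j

theorem pvRun_eq_altGo (l : List Int) (idx : Int) (i : Nat) :
    pvRun l idx i = pvAltGo idx (l.drop i) := by
  rw [pvRun]
  split
  · rename_i h
    rw [List.drop_eq_getElem_cons h, pvAltGo_cons]
    show List.replicate (pvScan l l[i] (i + 1) - i) (idx + 1) ++
        pvRun l (idx + 1) (pvScan l l[i] (i + 1)) = _
    have hs : pvScan l l[i] (i + 1) = i + 1 + pvRunLen l[i] (l.drop (i + 1)) :=
      pvScan_eq l l[i] (i + 1)
    have hge := pvScan_ge l l[i] (i + 1)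
    rw [pvRun_eq_altGo l (idx + 1) (pvScan l l[i] (i + 1))]
    rw [hs, List.drop_drop]
    congr 2
    all_goals omega
  · rename_i h
    rw [List.drop_eq_nil_iff.mpr (by omega), pvAltGo_nil]
termination_by l.length - i
decreasing_by have := pvScan_ge l l[i] (i + 1); omega

theorem pvAltGo_eq_canon : ∀ (xs : List Int) (v c : Int),
    pvAltGo c (v :: xs) = (c + 1) :: pvCanon (c + 1) v xs := by
  intro xs
  induction xs with
  | nil => intro v c; rw [pvAltGo_cons]; simp [pvRunLen, pvAltGo_nil, pvCanon]
  | cons x xs ih =>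
    intro v c
    by_cases hx : x = v
    · subst hx
      have h1 : pvAltGo c (x :: x :: xs) = (c + 1) :: pvAltGo c (x :: xs) := by
        rw [pvAltGo_cons, pvAltGo_cons]
        simp only [pvRunLen, reduceIte, List.drop_succ_cons]
        rw [show 1 + (pvRunLen x xs + 1) = pvRunLen x xs + 1 + 1 from by omega,
            show 1 + pvRunLen x xs = pvRunLen x xs + 1 from by omega]
        simp [List.replicate_succ]
      rw [h1, ih x c]
      simp [pvCanon]
    · have h1 : pvAltGo c (v :: x :: xs) = (c + 1) :: pvAltGo (c + 1) (x :: xs) := by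
        rw [pvAltGo_cons]
        simp [pvRunLen, hx]
      rw [h1, ih x (c + 1)]
      simp [pvCanon, Ne.symm hx]

-- A's fold over the remaining index range, related to pvCanon on the remaining suffix
theorem pvFoldA_eq_canon (l : List Int) : ∀ (xs : List Int) (p : Nat) (prev c : Int)
    (acc : List Int), l.drop p = xs → 0 < p → l[p - 1]? = some prev →
    ((PySem.List.pyRange (p : Int) (l.length : Int) 1).foldl
      (fun (st : List Int × Int) i =>
        let count :=
          if i ≠ 0 then
            let prev := PySem.List.pyGetD l (i - 1) 0
            let cur := PySem.List.pyGetD l i 0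
            if prev ≠ cur then st.2 + 1 else st.2
          else st.2
        (st.1 ++ [count], count))
      (acc, c)).1 = acc ++ pvCanon c prev xs := by
  intro xs
  induction xs with
  | nil =>
    intro p prev c acc hdrop hp hprev
    have hlen : l.length ≤ p := by
      by_contra h
      have := List.drop_eq_nil_iff.mp hdrop
      omega
    rw [PySem.List.pyRange_one_eq_nil (by exact_mod_cast hlen)]
    simp [pvCanon]
  | cons x xs ih =>
    intro p prev c acc hdrop hp hprev
    have hplt : p < l.length := by
      by_contra h
      rw [List.drop_eq_nil_iff.mpr (by omega)] at hdrop
      simp at hdrop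
    have hx : l[p]? = some x := by
      have h := (List.getElem?_drop (xs := l) (i := p) (j := 0)).symm
      rw [hdrop] at h
      simpa using h
    have hne : (p : Int) ≠ 0 := by exact_mod_cast hp.ne'
    have hprevD : PySem.List.pyGetD l ((p : Int) - 1) 0 = prev := by
      have hc : ((p : Int) - 1) = ((p - 1 : Nat) : Int) := by omega
      rw [hc, PySem.List.pyGetD_natCast]
      simp [List.getD, hprev]
    have hcurD : PySem.List.pyGetD l (p : Int) 0 = x := by
      rw [PySem.List.pyGetD_natCast]
      simp [List.getD, hx]
    rw [PySem.List.pyRange_one_cons (by exact_mod_cast hplt), List.foldl_cons]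
    have hstep : (let count :=
          if (p : Int) ≠ 0 then
            let prev := PySem.List.pyGetD l ((p : Int) - 1) 0
            let cur := PySem.List.pyGetD l (p : Int) 0
            if prev ≠ cur then ((acc, c) : List Int × Int).2 + 1 else ((acc, c) : List Int × Int).2
          else ((acc, c) : List Int × Int).2
        (((acc, c) : List Int × Int).1 ++ [count], count))
        = ((acc ++ [if prev = x then c else c + 1], if prev = x then c else c + 1) : List Int × Int) := by
      simp only [hprevD, hcurD, ne_eq, ite_not]
      rw [if_neg (by exact_mod_cast hne)]
    rw [hstep]
    have hdrop' : l.drop (p + 1) = xs := by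
      rw [← List.drop_drop, hdrop]
      simp
    have hprev' : l[(p + 1) - 1]? = some x := by simpa using hx
    have hcast : ((p : Int) + 1) = ((p + 1 : Nat) : Int) := by push_cast; ring
    rw [hcast]
    by_cases hpx : prev = x
    · rw [if_pos hpx]
      have h2 := ih (p + 1) x c (acc ++ [c]) hdrop' (by omega) hprev'
      have h3 : (acc ++ [c]) ++ pvCanon c x xs = acc ++ pvCanon c prev (x :: xs) := by
        simp [pvCanon, hpx]
      exact h2.trans h3
    · rw [if_neg hpx]
      have h2 := ih (p + 1) x (c + 1) (acc ++ [c + 1]) hdrop' (by omega) hprev'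
      have h3 : (acc ++ [c + 1]) ++ pvCanon (c + 1) x xs = acc ++ pvCanon c prev (x :: xs) := by
        simp [pvCanon, hpx]
      exact h2.trans h3

theorem pvA_eq_canon (l : List Int) :
    group_by_list_renum l = match l with
      | [] => []
      | v :: xs => 1 :: pvCanon 1 v xs := by
  match l with
  | [] => simp [group_by_list_renum]
  | v :: xs =>
    unfold group_by_list_renum
    have h0 : ((0 : Int) < ((v :: xs).length : Int)) := by simp
    rw [PySem.List.pyRange_one_cons h0, List.foldl_cons]
    simp only [ne_eq, not_true_eq_false, reduceIte]
    have h1 := pvFoldA_eq_canon (v :: xs) xs 1 v 1 [1] (by simp) (by omega) (by simp)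
    simpa using h1

-- ===== VERDICT (by name: the statement is the Claim_ definition above) =====
theorem group_by_list_renum_spec : Claim_equal_group_by_list_renum := by
  intro l _
  unfold Spec_group_by_list_renum group_by_list_renum_alt
  rw [pvRun_eq_altGo, List.drop_zero, pvA_eq_canon]
  match l with
  | [] => rw [pvAltGo_nil]
  | v :: xs => rw [pvAltGo_eq_canon]; simp
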